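-- pv_equiv track=rewrite | github.com/hksawczuk/grahamtools | examples/fiber_coefficients.py | _classify_tree_from_mask
-- ===== SOURCE A (Python) =====
-- from collections import defaultdict
--
-- def _base_to_edge_list(
--     base_mask: int, edge_list: list[tuple[int, int]]
-- ) -> list[tuple[int, int]]:
--     """Convert bitmask to list of edges."""
--     return [edge_list[i] for i in range(len(edge_list)) if base_mask & (1 << i)]
--
-- def _classify_tree_from_mask(
--     base_mask: int, edge_list: list[tuple[int, int]], n_vertices: int
-- ) -> int:
--     """Classify a tree type from its base edge bitmask.
--
--     Returns type index 0-5 (for the 6 trees on 6 vertices) or -1.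
--     """
--     edges = _base_to_edge_list(base_mask, edge_list)
--     ne = len(edges)
--     if ne != 5:
--         return -1
--
--     verts: set[int] = set()
--     for u, v in edges:
--         verts.add(u)
--         verts.add(v)
--     if len(verts) != 6:
--         return -1
--
--     adj: dict[int, set[int]] = defaultdict(set)
--     for u, v in edges:
--         adj[u].add(v)
--         adj[v].add(u)
--
--     start = next(iter(verts))
--     visited = {start}
--     stack = [start]
--     while stack:
--         node = stack.pop()
--         for u in adj[node]:
--             if u not in visited:
--                 visited.add(u)
--                 stack.append(u)
--     if len(visited) != len(verts):
--         return -1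
--
--     deg_seq = tuple(sorted(len(adj[v]) for v in verts))
--
--     if deg_seq == (1, 1, 2, 2, 2, 2):
--         return 0  # P_6
--     if deg_seq == (1, 1, 1, 1, 1, 5):
--         return 5  # K_{1,5}
--     if deg_seq == (1, 1, 1, 1, 3, 3):
--         return 4  # Double star
--     if deg_seq == (1, 1, 1, 1, 2, 4):
--         return 3  # Spider
--     if deg_seq == (1, 1, 1, 2, 2, 3):
--         v3 = [v for v in verts if len(adj[v]) == 3][0]
--         nbr_degs = sorted(len(adj[u]) for u in adj[v3])
--         if nbr_degs == [1, 2, 2]: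
--             return 1  # Caterpillar A
--         if nbr_degs == [1, 1, 2]:
--             return 2  # Caterpillar B
--     return -1
-- ===== SOURCE B (Python) =====
-- from collections import defaultdict
--
--
-- def _base_to_edge_list(base_mask, edge_list):
--     """Convert bitmask to list of edges."""
--     return [edge_list[i] for i in range(len(edge_list)) if base_mask & (1 << i)]
--
--
-- def _classify_tree_from_mask(base_mask, edge_list, n_vertices):
--     """Classify a tree type from its base edge bitmask (0-5, or -1).
--
--     Connectivity is decided by merging vertex components edge by edge
--     (a union-find over explicit component lists) instead of a DFS.
--     """
--     edges = _base_to_edge_list(base_mask, edge_list)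
--     if len(edges) != 5:
--         return -1
--
--     adj = defaultdict(set)
--     for u, v in edges:
--         adj[u].add(v)
--         adj[v].add(u)
--     if len(adj) != 6:
--         return -1
--
--     # merge components: afterwards the graph is connected iff one component
--     comps = [[v] for v in adj]
--     for u, v in edges:
--         cu = next(c for c in comps if u in c)
--         if v in cu:
--             continue
--         cv = next(c for c in comps if v in c)
--         comps = [c for c in comps if u not in c and v not in c] + [cu + cv]
--     if len(comps) != 1:
--         return -1
--
--     deg_seq = tuple(sorted(len(adj[v]) for v in adj))
--
--     if deg_seq == (1, 1, 2, 2, 2, 2):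
--         return 0  # P_6
--     if deg_seq == (1, 1, 1, 1, 1, 5):
--         return 5  # K_{1,5}
--     if deg_seq == (1, 1, 1, 1, 3, 3):
--         return 4  # Double star
--     if deg_seq == (1, 1, 1, 1, 2, 4):
--         return 3  # Spider
--     if deg_seq == (1, 1, 1, 2, 2, 3):
--         v3 = next(v for v in adj if len(adj[v]) == 3)
--         nbr_degs = sorted(len(adj[u]) for u in adj[v3])
--         if nbr_degs == [1, 2, 2]:
--             return 1  # Caterpillar A
--         if nbr_degs == [1, 1, 2]:
--             return 2  # Caterpillar B
--     return -1
-- ===== Notes on version B (the rewrite author's own statement) =====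
-- stated objective: alternative
-- what changed: The DFS stack traversal (plus the separately built vertex set) that tested connectivity is replaced by an edge-by-edge component-merging pass (a union-find over explicit component lists keyed by the adjacency dict's keys), returning -1 unless one component remains; the mask decoding, guards and degree-sequence cascade are unchanged.
import Mathlib
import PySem

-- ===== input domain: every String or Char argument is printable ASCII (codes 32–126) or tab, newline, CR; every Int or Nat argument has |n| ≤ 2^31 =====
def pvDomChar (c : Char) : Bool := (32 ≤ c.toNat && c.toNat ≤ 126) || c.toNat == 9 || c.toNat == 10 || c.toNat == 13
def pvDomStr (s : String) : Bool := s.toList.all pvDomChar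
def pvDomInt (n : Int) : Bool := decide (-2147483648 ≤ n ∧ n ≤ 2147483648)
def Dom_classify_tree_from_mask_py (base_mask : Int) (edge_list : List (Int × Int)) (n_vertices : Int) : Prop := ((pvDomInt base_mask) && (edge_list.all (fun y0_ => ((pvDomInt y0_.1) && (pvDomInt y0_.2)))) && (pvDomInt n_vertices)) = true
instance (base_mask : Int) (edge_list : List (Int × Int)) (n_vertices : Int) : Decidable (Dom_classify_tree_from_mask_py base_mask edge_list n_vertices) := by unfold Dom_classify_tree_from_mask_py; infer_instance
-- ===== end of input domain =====

-- B replaces A's DFS connectivity test by an edge-by-edge component-merging pass (union-find over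
-- explicit component lists, keyed by the adjacency dict); guards and the degree cascade are unchanged.

-- ===== PORT A =====

-- [edge_list[i] for i in range(len(edge_list)) if base_mask & (1 << i)]  (helper shared verbatim by A and B)
def baseToEdgeList (base_mask : Int) (edge_list : List (Int × Int)) : List (Int × Int) :=
  ((PySem.List.pyRange 0 (PySem.List.len edge_list) 1).filter
      (fun i => PySem.Int.band base_mask (1 <<< i.toNat) != 0)).map
    (fun i => PySem.List.pyGetD edge_list i (0, 0))

-- adj = defaultdict(set); for u, v in edges: adj[u].add(v); adj[v].add(u)   (identical loop in A and B)
def buildAdj (edges : List (Int × Int)) : PySem.Dict Int (PySem.Set Int) :=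
  edges.foldl
    (fun d e =>
      (d.modify e.1 PySem.Set.empty (fun s => PySem.Set.add s e.2)).modify e.2 PySem.Set.empty
        (fun s => PySem.Set.add s e.1))
    PySem.Dict.empty

-- the degree-sequence cascade, identical source code in A and B (A passes its verts set, B the dict keys)
def degCascade (adj : PySem.Dict Int (PySem.Set Int)) (vs : List Int) : Int :=
  let deg_seq := PySem.List.sorted (vs.map (fun v => PySem.Set.len (adj.getD v PySem.Set.empty))) (fun x => x) false
  if deg_seq = [1, 1, 2, 2, 2, 2] then 0
  else if deg_seq = [1, 1, 1, 1, 1, 5] then 5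
  else if deg_seq = [1, 1, 1, 1, 3, 3] then 4
  else if deg_seq = [1, 1, 1, 1, 2, 4] then 3
  else if deg_seq = [1, 1, 1, 2, 2, 3] then
    -- [v for v in vs if len(adj[v]) == 3][0]: nonempty here because deg_seq ends in 3
    let v3 := (vs.filter (fun v => PySem.Set.len (adj.getD v PySem.Set.empty) == 3)).headD 0
    let nbr_degs := PySem.List.sorted ((adj.getD v3 PySem.Set.empty).map (fun u => PySem.Set.len (adj.getD u PySem.Set.empty))) (fun x => x) false
    if nbr_degs = [1, 2, 2] then 1
    else if nbr_degs = [1, 1, 2] then 2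
    else -1
  else -1

-- for u in adj[node]: if u not in visited: visited.add(u); stack.append(u)
def dfsStep (vs : PySem.Set Int × List Int) (u : Int) : PySem.Set Int × List Int :=
  if PySem.Set.contains vs.1 u then vs else (PySem.Set.add vs.1 u, vs.2 ++ [u])

-- the inner for-loop appends the same block Δ of fresh nodes to visited and to the stack
theorem dfsStep_delta (ns : List Int) (v s : List Int) :
    ∃ Δ : List Int, ns.foldl dfsStep (v, s) = (v ++ Δ, s ++ Δ) ∧ Δ.Nodup ∧
      (∀ x ∈ Δ, x ∈ ns ∧ x ∉ v) ∧ (∀ x ∈ ns, x ∈ v ++ Δ) := by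
  induction ns generalizing v s with
  | nil => exact ⟨[], by simp⟩
  | cons u t ih =>
    simp only [List.foldl_cons, dfsStep]
    by_cases hu : u ∈ v
    · rw [if_pos (by simpa [PySem.Set.contains_iff] using hu)]
      obtain ⟨Δ, heq, hnd, hmem, hcl⟩ := ih v s
      exact ⟨Δ, heq, hnd, fun x hx => ⟨List.mem_cons_of_mem _ (hmem x hx).1, (hmem x hx).2⟩, by
        intro x hx
        rcases List.mem_cons.1 hx with rfl | hx
        · exact List.mem_append_left _ hu
        · exact hcl x hx⟩
    · rw [if_neg (by simpa [PySem.Set.contains_iff] using hu)]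
      simp only [PySem.Set.add_of_not_mem hu]
      obtain ⟨Δ, heq, hnd, hmem, hcl⟩ := ih (v ++ [u]) (s ++ [u])
      refine ⟨u :: Δ, ?_, ?_, ?_, ?_⟩
      · simpa [List.append_assoc] using heq
      · exact List.nodup_cons.2 ⟨fun hx => by simpa using (hmem u hx).2, hnd⟩
      · intro x hx
        rcases List.mem_cons.1 hx with rfl | hx
        · exact ⟨List.mem_cons_self, hu⟩
        · refine ⟨List.mem_cons_of_mem _ (hmem x hx).1, fun hv => (hmem x hx).2 (by simp [hv])⟩
      · intro x hx
        rcases List.mem_cons.1 hx with rfl | hx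
        · simp
        · have := hcl x hx
          simpa [List.append_assoc] using this


-- counting lemma for the termination measure
theorem countP_append_delta (U v Δ : List Int) (hU : U.Nodup) (hΔ : Δ.Nodup)
    (hsub : ∀ x ∈ Δ, x ∈ U ∧ x ∉ v) :
    U.countP (fun x => !(PySem.Set.contains (v ++ Δ) x)) + Δ.length
      = U.countP (fun x => !(PySem.Set.contains v x)) := by
  induction Δ generalizing v with
  | nil => simp
  | cons d Δ' ih =>
    have hd : d ∈ U ∧ d ∉ v := hsub d List.mem_cons_self
    have hstep : U.countP (fun x => !(PySem.Set.contains (v ++ [d]) x)) + 1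
        = U.countP (fun x => !(PySem.Set.contains v x)) := by
      have hperm : U.Perm (d :: U.erase d) := List.perm_cons_erase hd.1
      have hnd : (d :: U.erase d).Nodup := hperm.nodup_iff.1 hU
      have hdd : d ∉ U.erase d := (List.nodup_cons.1 hnd).1
      rw [hperm.countP_eq, hperm.countP_eq]
      simp only [List.countP_cons]
      have h1 : (!(PySem.Set.contains (v ++ [d]) d)) = false := by
        simp
      have h2 : (!(PySem.Set.contains v d)) = true := by
        simp [hd.2]
      rw [h1, h2]
      have hcong : (U.erase d).countP (fun x => !(PySem.Set.contains (v ++ [d]) x))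
          = (U.erase d).countP (fun x => !(PySem.Set.contains v x)) := by
        apply List.countP_congr
        intro x hx
        have hxd : x ≠ d := fun hh => hdd (hh ▸ hx)
        simp [hxd]
      rw [hcong]
      simp
    have ih' := ih (v ++ [d]) (List.nodup_cons.1 hΔ).2 (fun x hx => by
      refine ⟨(hsub x (List.mem_cons_of_mem _ hx)).1, ?_⟩
      have hxd : x ≠ d := fun hh => (List.nodup_cons.1 hΔ).1 (hh ▸ hx)
      simp [hxd, (hsub x (List.mem_cons_of_mem _ hx)).2])
    calc U.countP (fun x => !(PySem.Set.contains (v ++ d :: Δ') x)) + (d :: Δ').length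
        = U.countP (fun x => !(PySem.Set.contains ((v ++ [d]) ++ Δ') x)) + Δ'.length + 1 := by
          simp [List.append_assoc]; omega
      _ = U.countP (fun x => !(PySem.Set.contains (v ++ [d]) x)) + 1 := by rw [ih']
      _ = _ := hstep


theorem mem_getD_values (d : PySem.Dict Int (PySem.Set Int)) (k y : Int)
    (h : y ∈ d.getD k PySem.Set.empty) : y ∈ PySem.Set.ofList d.values.flatten := by
  rw [PySem.Set.mem_ofList, List.mem_flatten]
  rw [PySem.Dict.getD_eq_get?_getD] at h
  cases hg : d.get? k with
  | none => rw [hg] at h; simp [PySem.Set.empty] at h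
  | some s =>
    rw [hg] at h
    refine ⟨s, ?_, h⟩
    have := PySem.Dict.mem_items_of_get?_eq_some d hg
    simp only [PySem.Dict.values]
    exact List.mem_map.2 ⟨(k, s), this, rfl⟩


def dfsMeasure (adj : PySem.Dict Int (PySem.Set Int)) (visited : List Int) (stack : List Int) : Nat :=
  2 * ((PySem.Set.ofList adj.values.flatten).countP (fun x => !(PySem.Set.contains visited x)))
    + stack.length

-- while stack: node = stack.pop(); for u in adj[node]: …
def dfsLoop (adj : PySem.Dict Int (PySem.Set Int)) (visited : PySem.Set Int) (stack : List Int) :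
    PySem.Set Int :=
  if h : stack = [] then visited
  else
    let node := stack.getLast h
    let vs := (adj.getD node PySem.Set.empty).foldl dfsStep (visited, stack.dropLast)
    dfsLoop adj vs.1 vs.2
termination_by dfsMeasure adj visited stack
decreasing_by
  obtain ⟨Δ, heq, hnd, hmem, -⟩ :=
    dfsStep_delta (adj.getD (stack.getLast h) PySem.Set.empty) visited stack.dropLast
  simp only [heq, dfsMeasure]
  have hcnt := countP_append_delta (PySem.Set.ofList adj.values.flatten) visited Δ
    (PySem.Set.nodup_ofList _) hnd
    (fun x hx => ⟨mem_getD_values _ _ _ (hmem x hx).1, (hmem x hx).2⟩)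
  have hlen : stack.length = stack.dropLast.length + 1 := by
    cases stack with
    | nil => exact absurd rfl h
    | cons a t => simp
  simp only [List.length_append]
  omega

def classify_tree_from_mask_py (base_mask : Int) (edge_list : List (Int × Int)) (n_vertices : Int) : Int :=
  let edges := baseToEdgeList base_mask edge_list
  let ne := PySem.List.len edges
  if ne ≠ 5 then -1
  else
    let verts : PySem.Set Int :=
      edges.foldl (fun s e => PySem.Set.add (PySem.Set.add s e.1) e.2) PySem.Set.empty
    if PySem.Set.len verts ≠ 6 then -1
    else
      let adj := buildAdj edges
      let start := verts.headD 0  -- next(iter(verts)): verts is nonempty here (its length is 6)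
      let visited := dfsLoop adj (PySem.Set.ofList [start]) [start]
      if PySem.Set.len visited ≠ PySem.Set.len verts then -1
      else degCascade adj verts

-- ===== PORT B =====

-- one merge step: cu = component of u; skip if v already there, else splice cu and cv into one
def mergeStep (comps : List (List Int)) (e : Int × Int) : List (List Int) :=
  let cu := (comps.find? (fun c => c.contains e.1)).getD []
  if cu.contains e.2 then comps
  else
    let cv := (comps.find? (fun c => c.contains e.2)).getD []
    (comps.filter (fun c => !(c.contains e.1) && !(c.contains e.2))) ++ [cu ++ cv]

def classify_tree_from_mask_py_alt (base_mask : Int) (edge_list : List (Int × Int)) (n_vertices : Int) : Int :=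
  let edges := baseToEdgeList base_mask edge_list
  if PySem.List.len edges ≠ 5 then -1
  else
    let adj := buildAdj edges
    if PySem.Dict.size adj ≠ 6 then -1
    else
      let comps := edges.foldl mergeStep ((PySem.Dict.keys adj).map (fun v => [v]))
      if PySem.List.len comps ≠ 1 then -1
      else degCascade adj (PySem.Dict.keys adj)

-- ===== PRECONDITION & SPEC =====
def Spec_classify_tree_from_mask_py (base_mask : Int) (edge_list : List (Int × Int)) (n_vertices : Int) (out : Int) : Prop := out = classify_tree_from_mask_py_alt base_mask edge_list n_vertices
instance (base_mask : Int) (edge_list : List (Int × Int)) (n_vertices : Int) (out : Int) : Decidable (Spec_classify_tree_from_mask_py base_mask edge_list n_vertices out) := by unfold Spec_classify_tree_from_mask_py; infer_instance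

-- ===== CLAIM (what is proved, stated in full; the proofs are below) =====
def Claim_equal_classify_tree_from_mask_py : Prop := ∀ (base_mask : Int) (edge_list : List (Int × Int)) (n_vertices : Int), Dom_classify_tree_from_mask_py base_mask edge_list n_vertices → Spec_classify_tree_from_mask_py base_mask edge_list n_vertices (classify_tree_from_mask_py base_mask edge_list n_vertices)

-- ===== LEMMAS AND PROOFS =====

-- the undirected adjacency relation of an edge list, and connectivity as its refl-trans closure
def ERel (E : List (Int × Int)) (a b : Int) : Prop := (a, b) ∈ E ∨ (b, a) ∈ E
def EConn (E : List (Int × Int)) (a b : Int) : Prop := Relation.ReflTransGen (ERel E) a b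

def vertsOf (E : List (Int × Int)) : PySem.Set Int :=
  E.foldl (fun s e => PySem.Set.add (PySem.Set.add s e.1) e.2) PySem.Set.empty

def SameC (comps : List (List Int)) (a b : Int) : Prop := ∃ c ∈ comps, a ∈ c ∧ b ∈ c

def CompsInv (P : List (Int × Int)) (verts : List Int) (comps : List (List Int)) : Prop :=
  (∀ c ∈ comps, c ≠ []) ∧ comps.flatten.Nodup ∧ (∀ x, x ∈ comps.flatten ↔ x ∈ verts) ∧
    (∀ c ∈ comps, ∀ x ∈ c, ∀ y ∈ c, EConn P x y) ∧ (∀ e ∈ P, SameC comps e.1 e.2)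

theorem mem_vertsOf_aux (E : List (Int × Int)) (s : PySem.Set Int) (x : Int) :
    x ∈ E.foldl (fun s e => PySem.Set.add (PySem.Set.add s e.1) e.2) s ↔
      x ∈ s ∨ ∃ e ∈ E, x = e.1 ∨ x = e.2 := by
  induction E generalizing s with
  | nil => simp
  | cons e t ih =>
    simp only [List.foldl_cons]
    rw [ih]
    simp [PySem.Set.mem_add]
    aesop

theorem mem_vertsOf (E : List (Int × Int)) (x : Int) :
    x ∈ vertsOf E ↔ ∃ e ∈ E, x = e.1 ∨ x = e.2 := by
  rw [vertsOf, mem_vertsOf_aux]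
  simp [PySem.Set.empty]

theorem nodup_vertsOf_aux (E : List (Int × Int)) (s : PySem.Set Int) (hs : s.Nodup) :
    (E.foldl (fun s e => PySem.Set.add (PySem.Set.add s e.1) e.2) s).Nodup := by
  induction E generalizing s with
  | nil => exact hs
  | cons e t ih => exact ih _ (PySem.Set.nodup_add _ _ (PySem.Set.nodup_add _ _ hs))

theorem nodup_vertsOf (E : List (Int × Int)) : (vertsOf E).Nodup :=
  nodup_vertsOf_aux E _ List.nodup_nil

theorem keys_buildAdj_aux (E : List (Int × Int)) :
    ∀ (d : PySem.Dict Int (PySem.Set Int)) (s : PySem.Set Int), d.keys = s →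
      (E.foldl (fun d e =>
        (d.modify e.1 PySem.Set.empty (fun s => PySem.Set.add s e.2)).modify e.2 PySem.Set.empty
          (fun s => PySem.Set.add s e.1)) d).keys
        = E.foldl (fun s e => PySem.Set.add (PySem.Set.add s e.1) e.2) s := by
  induction E with
  | nil => intro d s h; simpa using h
  | cons e t ih =>
    intro d s h
    simp only [List.foldl_cons]
    apply ih
    have hk1 : (d.modify e.1 PySem.Set.empty (fun s => PySem.Set.add s e.2)).keys
        = PySem.Set.add s e.1 := by
      rw [PySem.Dict.keys_modify]
      by_cases hc : e.1 ∈ s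
      · rw [PySem.Dict.keys_insert_of_contains, h, PySem.Set.add_of_mem hc]
        rw [PySem.Dict.contains_iff_mem_keys, h]; exact hc
      · rw [PySem.Dict.keys_insert_of_not_contains, h, PySem.Set.add_of_not_mem hc]
        rw [Bool.eq_false_iff]
        intro hcc
        exact hc (h ▸ (PySem.Dict.contains_iff_mem_keys _ _).1 hcc)
    rw [PySem.Dict.keys_modify]
    by_cases hc : e.2 ∈ PySem.Set.add s e.1
    · rw [PySem.Dict.keys_insert_of_contains, hk1, PySem.Set.add_of_mem hc]
      rw [PySem.Dict.contains_iff_mem_keys, hk1]; exact hc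
    · rw [PySem.Dict.keys_insert_of_not_contains, hk1, PySem.Set.add_of_not_mem hc]
      rw [Bool.eq_false_iff]
      intro hcc
      exact hc (hk1 ▸ (PySem.Dict.contains_iff_mem_keys _ _).1 hcc)

theorem keys_buildAdj (E : List (Int × Int)) : (buildAdj E).keys = vertsOf E :=
  keys_buildAdj_aux E PySem.Dict.empty PySem.Set.empty rfl

theorem getD_buildAdj_aux (E : List (Int × Int)) :
    ∀ (d : PySem.Dict Int (PySem.Set Int)) (x y : Int),
      (y ∈ (E.foldl (fun d e =>
        (d.modify e.1 PySem.Set.empty (fun s => PySem.Set.add s e.2)).modify e.2 PySem.Set.empty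
          (fun s => PySem.Set.add s e.1)) d).getD x PySem.Set.empty
      ↔ y ∈ d.getD x PySem.Set.empty ∨ ERel E x y) := by
  induction E with
  | nil => intro d x y; simp [ERel]
  | cons e t ih =>
    intro d x y
    simp only [List.foldl_cons]
    rw [ih]
    have h2 : ∀ z, (((d.modify e.1 PySem.Set.empty (fun s => PySem.Set.add s e.2)).modify e.2
        PySem.Set.empty (fun s => PySem.Set.add s e.1)).getD z PySem.Set.empty)
        = if z = e.2 then PySem.Set.add ((d.modify e.1 PySem.Set.empty
            (fun s => PySem.Set.add s e.2)).getD e.2 PySem.Set.empty) e.1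
          else (d.modify e.1 PySem.Set.empty (fun s => PySem.Set.add s e.2)).getD z
            PySem.Set.empty := by
      intro z; rw [PySem.Dict.getD_modify]
    have h1 : ∀ z, ((d.modify e.1 PySem.Set.empty (fun s => PySem.Set.add s e.2)).getD z
        PySem.Set.empty)
        = if z = e.1 then PySem.Set.add (d.getD e.1 PySem.Set.empty) e.2
          else d.getD z PySem.Set.empty := by
      intro z; rw [PySem.Dict.getD_modify]
    rw [h2, h1, h1]
    simp only [ERel, List.mem_cons, Prod.ext_iff]
    split_ifs with ha hb hb <;>
      simp only [PySem.Set.mem_add, PySem.Set.empty] <;> aesop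

theorem getD_buildAdj (E : List (Int × Int)) (x y : Int) :
    y ∈ (buildAdj E).getD x PySem.Set.empty ↔ ERel E x y := by
  rw [buildAdj, getD_buildAdj_aux]
  rw [PySem.Dict.getD_empty]
  simp [PySem.Set.empty]

theorem comp_unique {comps : List (List Int)} (hnd : comps.flatten.Nodup)
    {c1 c2 : List Int} (h1 : c1 ∈ comps) (h2 : c2 ∈ comps) {x : Int}
    (hx1 : x ∈ c1) (hx2 : x ∈ c2) : c1 = c2 := by
  by_contra hne
  have hpw := (List.nodup_flatten.1 hnd).2
  have hdisj := hpw.forall (fun _ _ hd => hd.symm) h1 h2 hne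
  exact hdisj hx1 hx2

theorem find?_comp {comps : List (List Int)} {x : Int} (hmem : x ∈ comps.flatten) :
    ∃ c, comps.find? (fun c => c.contains x) = some c ∧ c ∈ comps ∧ x ∈ c := by
  obtain ⟨c, hc, hxc⟩ := List.mem_flatten.1 hmem
  cases hf : comps.find? (fun c => c.contains x) with
  | none =>
    exact absurd (by simpa using List.find?_eq_none.1 hf c hc) (by simp [hxc])
  | some c' =>
    exact ⟨c', rfl, List.mem_of_find?_eq_some hf, by simpa using List.find?_some hf⟩

theorem conn_mono {P : List (Int × Int)} {e : Int × Int} {x y : Int} (h : EConn P x y) :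
    EConn (P ++ [e]) x y :=
  Relation.ReflTransGen.mono (fun _ _ hr => hr.imp (List.mem_append_left _) (List.mem_append_left _)) h

theorem econn_symm {E : List (Int × Int)} {a b : Int} (h : EConn E a b) : EConn E b a :=
  Relation.ReflTransGen.symmetric (fun _ _ hr => hr.symm.imp id id) h

theorem dfsLoop_spec (adj : PySem.Dict Int (PySem.Set Int)) (E : List (Int × Int)) (start : Int)
    (hadj : ∀ x y, y ∈ adj.getD x PySem.Set.empty ↔ ERel E x y) :
    ∀ (visited : PySem.Set Int) (stack : List Int),
      visited.Nodup → stack.Nodup → (∀ x ∈ stack, x ∈ visited) →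
      (∀ x ∈ visited, EConn E start x) →
      (∀ x ∈ visited, x ∉ stack → ∀ y, ERel E x y → y ∈ visited) →
      (∀ x ∈ visited, x ∈ dfsLoop adj visited stack) ∧ (dfsLoop adj visited stack).Nodup ∧
        (∀ x ∈ dfsLoop adj visited stack, EConn E start x) ∧
        (∀ x ∈ dfsLoop adj visited stack, ∀ y, ERel E x y → y ∈ dfsLoop adj visited stack) := by
  intro visited stack
  fun_induction dfsLoop adj visited stack with
  | case1 visited =>
    intro hndv _ _ hsound hclosed
    exact ⟨fun x hx => hx, hndv, hsound,
      fun x hx y hrel => hclosed x hx (by simp) y hrel⟩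
  | case2 visited stack h node vs ih =>
    intro hndv hnds hsv hsound hclosed
    obtain ⟨Δ, heq, hndΔ, hmemΔ, hclΔ⟩ :=
      dfsStep_delta (adj.getD (stack.getLast h) PySem.Set.empty) visited stack.dropLast
    simp only [vs, node, heq] at ih ⊢
    have hdisj : ∀ x ∈ visited, x ∉ Δ := fun x hx hxΔ => (hmemΔ x hxΔ).2 hx
    have hnode : stack.getLast h ∈ visited := hsv _ (List.getLast_mem h)
    have hnd' : (visited ++ Δ).Nodup := by
      refine List.nodup_append.2 ⟨hndv, hndΔ, ?_⟩
      intro x hx b hb hxb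
      exact hdisj x hx (hxb ▸ hb)
    have hnds' : (stack.dropLast ++ Δ).Nodup := by
      refine List.nodup_append.2 ⟨hnds.sublist (List.dropLast_sublist _), hndΔ, ?_⟩
      intro x hx b hb hxb
      exact hdisj x (hsv x (List.mem_of_mem_dropLast hx)) (hxb ▸ hb)
    have hsv' : ∀ x ∈ stack.dropLast ++ Δ, x ∈ visited ++ Δ := by
      intro x hx
      rcases List.mem_append.1 hx with hx | hx
      · exact List.mem_append_left _ (hsv x (List.mem_of_mem_dropLast hx))
      · exact List.mem_append_right _ hx
    have hsound' : ∀ x ∈ visited ++ Δ, EConn E start x := by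
      intro x hx
      rcases List.mem_append.1 hx with hx | hx
      · exact hsound x hx
      · exact (hsound _ hnode).tail ((hadj _ _).1 (hmemΔ x hx).1)
    have hclosed' : ∀ x ∈ visited ++ Δ, x ∉ stack.dropLast ++ Δ →
        ∀ y, ERel E x y → y ∈ visited ++ Δ := by
      intro x hx hxs y hrel
      rcases List.mem_append.1 hx with hxv | hxΔ
      · by_cases hst : x ∈ stack
        · rw [← List.dropLast_append_getLast h] at hst
          rcases List.mem_append.1 hst with hd | hl
          · exact absurd (List.mem_append_left _ hd) hxs
          · have hxn : x = stack.getLast h := by simpa using hl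
            exact hclΔ y ((hadj _ _).2 (hxn ▸ hrel))
        · exact List.mem_append_left _ (hclosed x hxv hst y hrel)
      · exact absurd (List.mem_append_right _ hxΔ) hxs
    obtain ⟨hsub, hnd, hso, hcl⟩ := ih hnd' hnds' hsv' hsound' hclosed'
    exact ⟨fun x hx => hsub x (List.mem_append_left _ hx), hnd, hso, hcl⟩

theorem mergeStep_inv {P : List (Int × Int)} {verts : List Int} {comps : List (List Int)}
    {e : Int × Int} (hInv : CompsInv P verts comps) (hu : e.1 ∈ verts) (hv : e.2 ∈ verts) :
    CompsInv (P ++ [e]) verts (mergeStep comps e) := by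
  obtain ⟨h_ne, h_nd, h_mem, h_sound, h_comp⟩ := hInv
  obtain ⟨cu, hfu, hcu_mem, hu_cu⟩ := find?_comp ((h_mem e.1).2 hu)
  obtain ⟨cv, hfv, hcv_mem, hv_cv⟩ := find?_comp ((h_mem e.2).2 hv)
  have huniq_u : ∀ c ∈ comps, e.1 ∈ c → c = cu := fun c hc hx => comp_unique h_nd hc hcu_mem hx hu_cu
  have huniq_v : ∀ c ∈ comps, e.2 ∈ c → c = cv := fun c hc hx => comp_unique h_nd hc hcv_mem hx hv_cv
  rw [mergeStep]
  simp only [hfu, hfv, Option.getD_some]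
  by_cases hvcu : e.2 ∈ cu
  · rw [if_pos (by simpa using hvcu)]
    refine ⟨h_ne, h_nd, h_mem, ?_, ?_⟩
    · exact fun c hc x hx y hy => conn_mono (h_sound c hc x hx y hy)
    · intro e' he'
      rcases List.mem_append.1 he' with he' | he'
      · exact h_comp e' he'
      · have : e' = e := by simpa using he'
        exact this ▸ ⟨cu, hcu_mem, hu_cu, hvcu⟩
  · rw [if_neg (by simpa using hvcu)]
    have hcune : cu ≠ cv := fun hh => hvcu (hh ▸ hv_cv)
    have hnodups := (List.nodup_flatten.1 h_nd).1
    have hpw := (List.nodup_flatten.1 h_nd).2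
    have hdisj_uv : cu.Disjoint cv := hpw.forall (fun _ _ hd => hd.symm) hcu_mem hcv_mem hcune
    have hmem' : ∀ c, c ∈ (comps.filter (fun c => !(c.contains e.1) && !(c.contains e.2)))
          ++ [cu ++ cv] ↔ (c ∈ comps ∧ e.1 ∉ c ∧ e.2 ∉ c) ∨ c = cu ++ cv := by
      intro c
      simp [List.mem_filter, List.mem_append]
    have hqfalse : ∀ c ∈ comps, ¬(!(c.contains e.1) && !(c.contains e.2)) = true →
        c = cu ∨ c = cv := by
      intro c hc hq
      rw [Bool.and_eq_true, Bool.not_eq_true', Bool.not_eq_true'] at hq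
      rcases not_and_or.1 hq with hq | hq
      · exact Or.inl (huniq_u c hc (List.contains_iff_mem.1 (Bool.ne_false_iff.1 hq)))
      · exact Or.inr (huniq_v c hc (List.contains_iff_mem.1 (Bool.ne_false_iff.1 hq)))
    have hflat' : ((comps.filter (fun c => !(c.contains e.1) && !(c.contains e.2)))
        ++ [cu ++ cv]).flatten = (comps.filter
          (fun c => !(c.contains e.1) && !(c.contains e.2))).flatten ++ (cu ++ cv) := by
      simp
    refine ⟨?_, ?_, ?_, ?_, ?_⟩
    · intro c hc
      rcases (hmem' c).1 hc with ⟨hc, -, -⟩ | rfl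
      · exact h_ne c hc
      · simp [h_ne cu hcu_mem]
    · rw [hflat']
      have hnf : (comps.filter (fun c => !(c.contains e.1) && !(c.contains e.2))).flatten.Nodup :=
        h_nd.sublist (List.filter_sublist.flatten)
      have hsubf : ∀ x ∈ (comps.filter
          (fun c => !(c.contains e.1) && !(c.contains e.2))).flatten, x ∉ cu ++ cv := by
        intro x hx
        obtain ⟨c, hc, hxc⟩ := List.mem_flatten.1 hx
        obtain ⟨hcc, hq⟩ := List.mem_filter.1 hc
        rw [Bool.and_eq_true, Bool.not_eq_true', Bool.not_eq_true'] at hq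
        intro hxcucv
        rcases List.mem_append.1 hxcucv with hxcu | hxcv
        · have hceq : c = cu := comp_unique h_nd hcc hcu_mem hxc hxcu
          exact absurd hq.1 (by rw [hceq]; simp [hu_cu])
        · have hceq : c = cv := comp_unique h_nd hcc hcv_mem hxc hxcv
          exact absurd hq.2 (by rw [hceq]; simp [hv_cv])
      refine List.nodup_append.2 ⟨hnf, ?_, ?_⟩
      · exact List.nodup_append.2 ⟨hnodups cu hcu_mem, hnodups cv hcv_mem,
          fun x hx b hb hxb => hdisj_uv hx (hxb ▸ hb)⟩
      · exact fun x hx b hb hxb => hsubf x hx (hxb ▸ hb)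
    · intro x
      rw [hflat']
      constructor
      · intro hx
        rcases List.mem_append.1 hx with hx | hx
        · obtain ⟨c, hc, hxc⟩ := List.mem_flatten.1 hx
          exact (h_mem x).1 (List.mem_flatten.2 ⟨c, (List.mem_filter.1 hc).1, hxc⟩)
        · rcases List.mem_append.1 hx with hx | hx
          · exact (h_mem x).1 (List.mem_flatten.2 ⟨cu, hcu_mem, hx⟩)
          · exact (h_mem x).1 (List.mem_flatten.2 ⟨cv, hcv_mem, hx⟩)
      · intro hx
        obtain ⟨c, hc, hxc⟩ := List.mem_flatten.1 ((h_mem x).2 hx)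
        by_cases hq : (!(c.contains e.1) && !(c.contains e.2)) = true
        · exact List.mem_append_left _ (List.mem_flatten.2 ⟨c, List.mem_filter.2 ⟨hc, hq⟩, hxc⟩)
        · rcases hqfalse c hc hq with rfl | rfl
          · exact List.mem_append_right _ (List.mem_append_left _ hxc)
          · exact List.mem_append_right _ (List.mem_append_right _ hxc)
    · intro c hc x hx y hy
      rcases (hmem' c).1 hc with ⟨hcc, -, -⟩ | rfl
      · exact conn_mono (h_sound c hcc x hx y hy)
      · have hedge : ERel (P ++ [e]) e.1 e.2 := Or.inl (by simp)
        have hedge' : ERel (P ++ [e]) e.2 e.1 := Or.inr (by simp)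
        have hxu : ∀ z ∈ cu, EConn (P ++ [e]) z e.1 :=
          fun z hz => conn_mono (h_sound cu hcu_mem z hz e.1 hu_cu)
        have hxv : ∀ z ∈ cv, EConn (P ++ [e]) z e.2 :=
          fun z hz => conn_mono (h_sound cv hcv_mem z hz e.2 hv_cv)
        rcases List.mem_append.1 hx with hxcu | hxcv <;>
          rcases List.mem_append.1 hy with hycu | hycv
        · exact conn_mono (h_sound cu hcu_mem x hxcu y hycu)
        · exact ((hxu x hxcu).tail hedge).trans (econn_symm (hxv y hycv))
        · exact ((hxv x hxcv).tail hedge').trans (econn_symm (hxu y hycu))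
        · exact conn_mono (h_sound cv hcv_mem x hxcv y hycv)
    · intro e' he'
      rcases List.mem_append.1 he' with he' | he'
      · obtain ⟨c, hc, h1, h2⟩ := h_comp e' he'
        by_cases hq : (!(c.contains e.1) && !(c.contains e.2)) = true
        · refine ⟨c, List.mem_append_left _ (List.mem_filter.2 ⟨hc, hq⟩), h1, h2⟩
        · rcases hqfalse c hc hq with hceq | hceq
          · exact ⟨cu ++ cv, (hmem' _).2 (Or.inr rfl), List.mem_append_left _ (hceq ▸ h1),
              List.mem_append_left _ (hceq ▸ h2)⟩
          · exact ⟨cu ++ cv, (hmem' _).2 (Or.inr rfl), List.mem_append_right _ (hceq ▸ h1),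
              List.mem_append_right _ (hceq ▸ h2)⟩
      · have : e' = e := by simpa using he'
        subst this
        exact ⟨cu ++ cv, (hmem' _).2 (Or.inr rfl), List.mem_append_left _ hu_cu,
          List.mem_append_right _ hv_cv⟩

theorem compsLoop_inv (verts : List Int) :
    ∀ (es P : List (Int × Int)) (comps : List (List Int)), CompsInv P verts comps →
      (∀ e ∈ es, e.1 ∈ verts ∧ e.2 ∈ verts) →
      CompsInv (P ++ es) verts (es.foldl mergeStep comps) := by
  intro es
  induction es with
  | nil => intro P comps h _; simpa using h
  | cons e t ih =>
    intro P comps h hes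
    have h1 := mergeStep_inv h (hes e List.mem_cons_self).1 (hes e List.mem_cons_self).2
    have := ih (P ++ [e]) (mergeStep comps e) h1
      (fun e' he' => hes e' (List.mem_cons_of_mem _ he'))
    simpa [List.append_assoc] using this

theorem conn_sameC {E : List (Int × Int)} {verts : List Int} {comps : List (List Int)}
    (hInv : CompsInv E verts comps) {x y : Int} (hx : x ∈ verts) (h : EConn E x y) :
    SameC comps x y := by
  obtain ⟨-, h_nd, h_mem, -, h_comp⟩ := hInv
  have h' : Relation.ReflTransGen (ERel E) x y := h
  induction h' with
  | refl =>
    obtain ⟨c, hc, hxc⟩ := List.mem_flatten.1 ((h_mem x).2 hx)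
    exact ⟨c, hc, hxc, hxc⟩
  | tail hconn hrel ih =>
    obtain ⟨c, hc, hxc, hbc⟩ := ih hconn
    rcases hrel with hr | hr
    · obtain ⟨c', hc', h1, h2⟩ := h_comp _ hr
      have : c = c' := comp_unique h_nd hc hc' hbc h1
      exact ⟨c, hc, hxc, this ▸ h2⟩
    · obtain ⟨c', hc', h1, h2⟩ := h_comp _ hr
      have : c = c' := comp_unique h_nd hc hc' hbc h2
      exact ⟨c, hc, hxc, this ▸ h1⟩

theorem comps_length_one_iff {E : List (Int × Int)} {verts : List Int} {comps : List (List Int)}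
    (hInv : CompsInv E verts comps) {start : Int} (hstart : start ∈ verts) :
    comps.length = 1 ↔ ∀ v ∈ verts, EConn E start v := by
  constructor
  · intro hlen v hv
    obtain ⟨c, hc⟩ := List.length_eq_one_iff.1 hlen
    subst hc
    have hs : start ∈ c := by simpa using (hInv.2.2.1 start).2 hstart
    have hvv : v ∈ c := by simpa using (hInv.2.2.1 v).2 hv
    exact hInv.2.2.2.1 c (by simp) start hs v hvv
  · intro hconn
    cases hcs : comps with
    | nil =>
      exfalso
      have := (hInv.2.2.1 start).2 hstart
      simp [hcs] at this
    | cons c1 rest =>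
      cases hrs : rest with
      | nil => simp
      | cons c2 rest2 =>
        exfalso
        have hc1m : c1 ∈ comps := by rw [hcs]; simp
        have hc2m : c2 ∈ comps := by rw [hcs, hrs]; simp
        obtain ⟨x1, hx1⟩ := List.exists_mem_of_ne_nil c1 (hInv.1 c1 hc1m)
        obtain ⟨x2, hx2⟩ := List.exists_mem_of_ne_nil c2 (hInv.1 c2 hc2m)
        have hx1v : x1 ∈ verts := (hInv.2.2.1 x1).1 (List.mem_flatten.2 ⟨c1, hc1m, hx1⟩)
        have hx2v : x2 ∈ verts := (hInv.2.2.1 x2).1 (List.mem_flatten.2 ⟨c2, hc2m, hx2⟩)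
        have hconn12 : EConn E x1 x2 := (econn_symm (hconn x1 hx1v)).trans (hconn x2 hx2v)
        obtain ⟨c, hc, hxc1, hxc2⟩ := conn_sameC hInv hx1v hconn12
        have hceq1 : c = c1 := comp_unique hInv.2.1 hc hc1m hxc1 hx1
        have hx2c1 : x2 ∈ c1 := hceq1 ▸ hxc2
        have hnd := hInv.2.1
        rw [hcs, hrs] at hnd
        simp only [List.flatten_cons, List.nodup_append] at hnd
        exact hnd.2.2 x2 hx2c1 x2 (List.mem_append_left _ hx2) rfl

theorem length_eq_iff_superset {R verts : List Int} (hR : R.Nodup) (hv : verts.Nodup)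
    (hsub : ∀ x ∈ R, x ∈ verts) : R.length = verts.length ↔ ∀ x ∈ verts, x ∈ R := by
  constructor
  · intro hlen x hx
    have hsubf : R.toFinset ⊆ verts.toFinset := by
      intro a ha
      exact List.mem_toFinset.2 (hsub a (List.mem_toFinset.1 ha))
    have hcard : verts.toFinset.card ≤ R.toFinset.card := by
      rw [List.toFinset_card_of_nodup hR, List.toFinset_card_of_nodup hv, hlen]
    have := Finset.eq_of_subset_of_card_le hsubf hcard
    exact List.mem_toFinset.1 (this ▸ List.mem_toFinset.2 hx)
  · intro hsup
    exact ((List.perm_ext_iff_of_nodup hR hv).2 (fun a => ⟨hsub a, hsup a⟩)).length_eq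

theorem rel_mem_verts (E : List (Int × Int)) {a b : Int} (h : ERel E a b) :
    a ∈ vertsOf E ∧ b ∈ vertsOf E := by
  rcases h with h | h
  · exact ⟨(mem_vertsOf E a).2 ⟨(a, b), h, Or.inl rfl⟩, (mem_vertsOf E b).2 ⟨(a, b), h, Or.inr rfl⟩⟩
  · exact ⟨(mem_vertsOf E a).2 ⟨(b, a), h, Or.inr rfl⟩, (mem_vertsOf E b).2 ⟨(b, a), h, Or.inl rfl⟩⟩

theorem conn_mem_verts (E : List (Int × Int)) {a b : Int} (ha : a ∈ vertsOf E)
    (h : EConn E a b) : b ∈ vertsOf E := by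
  have h' : Relation.ReflTransGen (ERel E) a b := h
  clear h
  induction h' with
  | refl => exact ha
  | tail _ hrel _ => exact (rel_mem_verts E hrel).2

theorem dfs_hyps (adj : PySem.Dict Int (PySem.Set Int)) (E : List (Int × Int)) (start : Int)
    (hadj : ∀ x y, y ∈ adj.getD x PySem.Set.empty ↔ ERel E x y) :
    (∀ x ∈ ([start] : List Int), x ∈ dfsLoop adj (PySem.Set.ofList [start]) [start]) ∧
      (dfsLoop adj (PySem.Set.ofList [start]) [start]).Nodup ∧
      (∀ x ∈ dfsLoop adj (PySem.Set.ofList [start]) [start], EConn E start x) ∧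
      (∀ x ∈ dfsLoop adj (PySem.Set.ofList [start]) [start], ∀ y, ERel E x y →
        y ∈ dfsLoop adj (PySem.Set.ofList [start]) [start]) := by
  have hof : PySem.Set.ofList [start] = [start] := rfl
  rw [hof]
  exact dfsLoop_spec adj E start hadj [start] [start] (by simp) (by simp) (by simp)
    (by intro x hx; simp at hx; subst hx; exact Relation.ReflTransGen.refl)
    (by intro x hx hxs; simp at hx; simp [hx] at hxs)

theorem dfs_mem (adj : PySem.Dict Int (PySem.Set Int)) (E : List (Int × Int)) (start : Int)
    (hadj : ∀ x y, y ∈ adj.getD x PySem.Set.empty ↔ ERel E x y) (x : Int) :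
    x ∈ dfsLoop adj (PySem.Set.ofList [start]) [start] ↔ EConn E start x := by
  obtain ⟨hsub, hnd, hso, hcl⟩ := dfs_hyps adj E start hadj
  constructor
  · exact hso x
  · intro h
    have h' : Relation.ReflTransGen (ERel E) start x := h
    clear h
    induction h' with
    | refl => exact hsub start (by simp)
    | tail _ hrel ih => exact hcl _ ih _ hrel

theorem dfs_nodup (adj : PySem.Dict Int (PySem.Set Int)) (E : List (Int × Int)) (start : Int)
    (hadj : ∀ x y, y ∈ adj.getD x PySem.Set.empty ↔ ERel E x y) :
    (dfsLoop adj (PySem.Set.ofList [start]) [start]).Nodup :=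
  (dfs_hyps adj E start hadj).2.1

theorem flatten_map_singleton (l : List Int) : (l.map (fun v => [v])).flatten = l := by
  induction l with
  | nil => rfl
  | cons a t ih => simp [ih]

theorem comps0_inv (E : List (Int × Int)) :
    CompsInv [] (vertsOf E) ((vertsOf E).map (fun v => [v])) := by
  refine ⟨by simp, ?_, ?_, ?_, by simp⟩
  · rw [flatten_map_singleton]; exact nodup_vertsOf E
  · rw [flatten_map_singleton]; intro x; rfl
  · intro c hc x hx y hy
    obtain ⟨v, -, rfl⟩ := List.mem_map.1 hc
    simp at hx hy
    subst hx hy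
    exact Relation.ReflTransGen.refl

-- ===== VERDICT (by name: the statement is the Claim_ definition above) =====
theorem headD_mem_of_ne_nil {l : List Int} (h : l ≠ []) : l.headD 0 ∈ l := by
  cases l with
  | nil => exact absurd rfl h
  | cons a t => simp

theorem classify_tree_from_mask_py_spec : Claim_equal_classify_tree_from_mask_py := by
  intro base_mask edge_list n_vertices _
  rw [Spec_classify_tree_from_mask_py]
  simp only [classify_tree_from_mask_py, classify_tree_from_mask_py_alt]
  by_cases h5 : PySem.List.len (baseToEdgeList base_mask edge_list) ≠ 5
  · rw [if_pos h5, if_pos h5]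
  · rw [if_neg h5, if_neg h5]
    have hverts : (baseToEdgeList base_mask edge_list).foldl
        (fun s e => PySem.Set.add (PySem.Set.add s e.1) e.2) PySem.Set.empty
        = vertsOf (baseToEdgeList base_mask edge_list) := rfl
    rw [hverts]
    set E := baseToEdgeList base_mask edge_list with hEdef
    have hsz : PySem.Dict.size (buildAdj E) = (vertsOf E).length := by
      have h1 : (buildAdj E).keys.length = (vertsOf E).length := by rw [keys_buildAdj]
      simpa [PySem.Dict.size, PySem.Dict.keys] using h1
    have hlen6 : PySem.Set.len (vertsOf E) = ((vertsOf E).length : Int) := rfl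
    have hg2 : (PySem.Set.len (vertsOf E) ≠ 6) ↔ (PySem.Dict.size (buildAdj E) ≠ 6) := by
      rw [hlen6, hsz]
      omega
    by_cases h6 : PySem.Set.len (vertsOf E) ≠ 6
    · rw [if_pos h6, if_pos (hg2.1 h6)]
    · rw [if_neg h6, if_neg (fun hh => h6 (hg2.2 hh))]
      have h6' : (vertsOf E).length = 6 := by
        rw [hlen6] at h6
        omega
      have hvne : vertsOf E ≠ [] := by
        intro hh
        rw [hh] at h6'
        simp at h6'
      have hstart : (vertsOf E).headD 0 ∈ vertsOf E := headD_mem_of_ne_nil hvne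
      set start := (vertsOf E).headD 0 with hstartdef
      have hadj := getD_buildAdj E
      have hmemR := dfs_mem (buildAdj E) E start hadj
      have hndR := dfs_nodup (buildAdj E) E start hadj
      have hsubR : ∀ x ∈ dfsLoop (buildAdj E) (PySem.Set.ofList [start]) [start], x ∈ vertsOf E :=
        fun x hx => conn_mem_verts E hstart ((hmemR x).1 hx)
      have hA : (PySem.Set.len (dfsLoop (buildAdj E) (PySem.Set.ofList [start]) [start])
          ≠ PySem.Set.len (vertsOf E)) ↔ ¬(∀ v ∈ vertsOf E, EConn E start v) := by
        have hcast : (PySem.Set.len (dfsLoop (buildAdj E) (PySem.Set.ofList [start]) [start])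
            = PySem.Set.len (vertsOf E)) ↔
            ((dfsLoop (buildAdj E) (PySem.Set.ofList [start]) [start]).length
              = (vertsOf E).length) := by
          constructor <;> intro hh
          · exact Int.ofNat_inj.1 hh
          · exact congrArg (fun n : Nat => (n : Int)) hh
        rw [not_iff_not, hcast, length_eq_iff_superset hndR (nodup_vertsOf E) hsubR]
        exact forall₂_congr (fun v _ => hmemR v)
      have hinv := compsLoop_inv (vertsOf E) E [] ((vertsOf E).map (fun v => [v]))
        (comps0_inv E)
        (fun e he => ⟨(mem_vertsOf E e.1).2 ⟨e, he, Or.inl rfl⟩,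
          (mem_vertsOf E e.2).2 ⟨e, he, Or.inr rfl⟩⟩)
      rw [List.nil_append] at hinv
      have hB : (PySem.List.len (E.foldl mergeStep ((buildAdj E).keys.map (fun v => [v]))) ≠ 1)
          ↔ ¬(∀ v ∈ vertsOf E, EConn E start v) := by
        rw [keys_buildAdj, not_iff_not]
        have hcast : (PySem.List.len (E.foldl mergeStep ((vertsOf E).map (fun v => [v]))) = 1)
            ↔ ((E.foldl mergeStep ((vertsOf E).map (fun v => [v]))).length = 1) := by
          constructor <;> intro hh
          · exact Int.ofNat_inj.1 hh
          · exact congrArg (fun n : Nat => (n : Int)) hh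
        rw [hcast]
        exact comps_length_one_iff hinv hstart
      by_cases hc : ∀ v ∈ vertsOf E, EConn E start v
      · rw [if_neg (fun hh => (hA.1 hh) hc), if_neg (fun hh => (hB.1 hh) hc), keys_buildAdj]
      · rw [if_pos (hA.2 hc), if_pos (hB.2 hc)]
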